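-- pv_equiv track=rewrite | github.com/samanthacho/cpsc422 | a1/pomdp.py | _conglomerate_same_squares
-- ===== SOURCE A (Python) =====
-- def _conglomerate_same_squares(squares):
--     ret = {}
--     for square in squares:
--         if (square[0], square[1]) not in ret:
--             ret[(square[0], square[1])] = square[2]
--         else:
--             ret[(square[0], square[1])] += square[2]
--     return ret
-- ===== SOURCE B (Python) =====
-- def _conglomerate_same_squares(squares):
--     keys = dict.fromkeys((s[0], s[1]) for s in squares)
--     return {k: sum(s[2] for s in squares if (s[0], s[1]) == k) for k in keys}
-- ===== Notes on version B (the rewrite author's own statement) =====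
-- stated objective: alternative
-- what changed: Replaces A's single dict-accumulation pass with a two-phase plan: first collect the distinct (x,y) keys in first-occurrence order via dict.fromkeys, then build the result by summing the matching third components per key with a comprehension.
import Mathlib
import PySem

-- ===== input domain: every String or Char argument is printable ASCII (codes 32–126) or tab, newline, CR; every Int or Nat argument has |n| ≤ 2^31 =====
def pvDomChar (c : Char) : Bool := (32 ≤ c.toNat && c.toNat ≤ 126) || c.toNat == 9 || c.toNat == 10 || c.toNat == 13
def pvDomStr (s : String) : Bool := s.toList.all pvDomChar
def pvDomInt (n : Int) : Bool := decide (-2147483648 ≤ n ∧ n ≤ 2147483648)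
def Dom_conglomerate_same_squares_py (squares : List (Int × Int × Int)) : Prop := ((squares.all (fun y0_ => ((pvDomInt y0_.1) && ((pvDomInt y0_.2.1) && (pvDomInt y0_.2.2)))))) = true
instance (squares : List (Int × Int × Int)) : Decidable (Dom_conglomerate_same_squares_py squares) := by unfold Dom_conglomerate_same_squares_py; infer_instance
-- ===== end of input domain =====

-- B replaces A's single dict-accumulation pass with a two-phase plan (distinct keys first, then a per-key sum);
-- objective: alternative decomposition (no speed claim). Python A returns a dict keyed by (x,y); both ports
-- return it as the list of (x, y, total) triples in the dict's insertion order.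

-- ===== PORT A =====
-- the body of A's 'for square in squares' loop
def pvAStep (ret : PySem.Dict (Int × Int) Int) (square : Int × Int × Int) : PySem.Dict (Int × Int) Int :=
  if ret.contains (square.1, square.2.1) = false then
    ret.insert (square.1, square.2.1) square.2.2
  else
    ret.insert (square.1, square.2.1) (ret.getD (square.1, square.2.1) 0 + square.2.2)

def conglomerate_same_squares_py (squares : List (Int × Int × Int)) : List (Int × Int × Int) :=
  (squares.foldl pvAStep PySem.Dict.empty).items.map (fun p => (p.1.1, p.1.2, p.2))

-- ===== PORT B =====
def conglomerate_same_squares_py_alt (squares : List (Int × Int × Int)) : List (Int × Int × Int) :=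
  (PySem.Set.ofList (squares.map (fun s => (s.1, s.2.1)))).map (fun k =>
    (k.1, k.2, ((squares.filter (fun s => (s.1, s.2.1) == k)).map (fun s => s.2.2)).sum))

-- ===== PRECONDITION & SPEC =====
def Spec_conglomerate_same_squares_py (squares : List (Int × Int × Int)) (out : List (Int × Int × Int)) : Prop := out = conglomerate_same_squares_py_alt squares
instance (squares : List (Int × Int × Int)) (out : List (Int × Int × Int)) : Decidable (Spec_conglomerate_same_squares_py squares out) := by unfold Spec_conglomerate_same_squares_py; infer_instance

-- ===== CLAIM (what is proved, stated in full; the proofs are below) =====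
def Claim_equal_conglomerate_same_squares_py : Prop := ∀ (squares : List (Int × Int × Int)), Dom_conglomerate_same_squares_py squares → Spec_conglomerate_same_squares_py squares (conglomerate_same_squares_py squares)

-- ===== LEMMAS AND PROOFS =====

-- A's loop body is an insert at the element's key (the two branches only differ in the value)
lemma pvAStep_eq_insert (d : PySem.Dict (Int × Int) Int) (s : Int × Int × Int) :
    pvAStep d s = d.insert (s.1, s.2.1)
      (if d.contains (s.1, s.2.1) = false then s.2.2 else d.getD (s.1, s.2.1) 0 + s.2.2) := by
  unfold pvAStep; split <;> rfl

lemma pvA_keys (l : List (Int × Int × Int)) :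
    (l.foldl pvAStep PySem.Dict.empty).keys = PySem.Set.ofList (l.map (fun s => (s.1, s.2.1))) := by
  have h : l.foldl pvAStep PySem.Dict.empty
      = l.foldl (fun d s => d.insert (s.1, s.2.1)
          (if d.contains (s.1, s.2.1) = false then s.2.2 else d.getD (s.1, s.2.1) 0 + s.2.2))
          PySem.Dict.empty := by
    apply PySem.List.foldl_congr_mem
    intro d s _; exact pvAStep_eq_insert d s
  rw [h, PySem.Dict.keys_foldl_insert_key]
  simp [PySem.Dict.keys_empty, PySem.Set.update_nil_left]

lemma pvA_nodup_keys (l : List (Int × Int × Int)) :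
    (l.foldl pvAStep PySem.Dict.empty).keys.Nodup := by
  rw [pvA_keys]; exact PySem.Set.nodup_ofList _

-- the accumulated value at any key is the sum of the matching third components
lemma pvA_getD (l : List (Int × Int × Int)) (d : PySem.Dict (Int × Int) Int) (k : Int × Int) :
    (l.foldl pvAStep d).getD k 0
      = d.getD k 0 + ((l.filter (fun s => (s.1, s.2.1) == k)).map (fun s => s.2.2)).sum := by
  induction l generalizing d with
  | nil => simp
  | cons s rest ih =>
    have hstep : (pvAStep d s).getD k 0
        = if k = (s.1, s.2.1) then d.getD k 0 + s.2.2 else d.getD k 0 := by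
      unfold pvAStep
      by_cases hk : k = (s.1, s.2.1)
      · subst hk
        cases hcon : d.contains (s.1, s.2.1)
        · simp [PySem.Dict.getD_of_not_contains d 0 hcon]
        · simp
      · cases hcon : d.contains (s.1, s.2.1) <;>
          simp [PySem.Dict.getD_insert, hk]
    simp only [List.foldl_cons, ih, hstep, List.filter_cons]
    by_cases hk : k = (s.1, s.2.1)
    · subst hk; simp; ring
    · have : ((s.1, s.2.1) == k) = false := by
        simpa using fun h => hk h.symm
      simp [this, hk]

-- ===== VERDICT (by name: the statement is the Claim_ definition above) =====
theorem conglomerate_same_squares_py_spec : Claim_equal_conglomerate_same_squares_py := by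
  intro squares _
  show conglomerate_same_squares_py squares = conglomerate_same_squares_py_alt squares
  unfold conglomerate_same_squares_py conglomerate_same_squares_py_alt
  rw [PySem.Dict.items_eq_map_keys _ (pvA_nodup_keys squares) 0, pvA_keys, List.map_map]
  apply List.map_congr_left
  intro k _
  simp only [Function.comp]
  rw [pvA_getD]
  simp
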